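-- pv_equiv track=rewrite | github.com/Copasito/HackerRank | 1 week preparation kit python/Min-Max sum.py | miniMaxSum
-- ===== SOURCE A (Python) =====
-- def miniMaxSum(arr):
--     n = 5
--     ans = []
--     mins = 0
--     mintemp = arr[0]
--     maxs = 0
--     maxtemp = arr[0]
--     """
--     for i in range(5):
--         mins.append(arr[i])
--         maxs.append(arr[i])
--         if arr[i] < mintemp:
--             mintemp = arr[i]
--         if arr[i] > maxtemp:
--             maxtemp = arr[i]
--     #elimino solo al mayor/menor elemento de cada arreglo
--             """
--
--     for i in range(5):
--         maxs = maxs + arr[i]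
--         mins = mins + arr[i]
--         if arr[i] < mintemp:
--             mintemp = arr[i]
--         if arr[i] > maxtemp:
--             maxtemp = arr[i]
--
--     maxs = maxs - mintemp
--     mins = mins - maxtemp
--
--     ans.append(mins)
--     ans.append(maxs)
--
--     # en lugar de guardar en un arreglo los valores, mejor haz una suma y luego sustraes el elemento que no entra
--     return ans
-- ===== SOURCE B (Python) =====
-- def miniMaxSum(arr):
--     v = sorted(arr[i] for i in range(5))
--     return [v[0] + v[1] + v[2] + v[3], v[1] + v[2] + v[3] + v[4]]
-- ===== Notes on version B (the rewrite author's own statement) =====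
-- stated objective: simpler
-- what changed: Replaces the running-sum-with-min/max-tracking loop by sort-the-first-five-then-slice: min sum = four smallest, max sum = four largest.
import Mathlib
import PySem

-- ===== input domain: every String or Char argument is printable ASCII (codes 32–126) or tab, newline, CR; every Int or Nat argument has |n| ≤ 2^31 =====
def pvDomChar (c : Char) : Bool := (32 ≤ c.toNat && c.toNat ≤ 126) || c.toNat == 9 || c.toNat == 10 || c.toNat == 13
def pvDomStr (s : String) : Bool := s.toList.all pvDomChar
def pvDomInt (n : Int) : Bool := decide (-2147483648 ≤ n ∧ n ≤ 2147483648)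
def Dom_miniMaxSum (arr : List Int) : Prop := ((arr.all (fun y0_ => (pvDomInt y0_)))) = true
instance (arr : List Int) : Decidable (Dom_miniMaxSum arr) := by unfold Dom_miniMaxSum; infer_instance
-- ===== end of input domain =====

-- B replaces A's running-sum loop with min/max tracking by sort-the-first-five then add the
-- four smallest / four largest (objective: simpler); equal return value wherever A returns.

-- ===== PORT A =====
-- arr[i] ported as pyGetD; under Pre_ (5 ≤ len arr) every index A uses (0..4) is in range,
-- exactly where Python returns without IndexError.
def miniMaxSum (arr : List Int) : List Int :=
  let ans : List Int := []
  let mins : Int := 0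
  let mintemp : Int := PySem.List.pyGetD arr 0 0
  let maxs : Int := 0
  let maxtemp : Int := PySem.List.pyGetD arr 0 0
  let st := (PySem.List.pyRange 0 5 1).foldl
    (fun (st : Int × Int × Int × Int) i =>
      let maxs := st.1 + PySem.List.pyGetD arr i 0
      let mins := st.2.1 + PySem.List.pyGetD arr i 0
      let mintemp := if PySem.List.pyGetD arr i 0 < st.2.2.1 then PySem.List.pyGetD arr i 0 else st.2.2.1
      let maxtemp := if PySem.List.pyGetD arr i 0 > st.2.2.2 then PySem.List.pyGetD arr i 0 else st.2.2.2
      (maxs, mins, mintemp, maxtemp))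
    (maxs, mins, mintemp, maxtemp)
  let maxs := st.1 - st.2.2.1
  let mins := st.2.1 - st.2.2.2
  let ans := ans ++ [mins]
  let ans := ans ++ [maxs]
  ans

-- ===== PORT B =====
def miniMaxSum_alt (arr : List Int) : List Int :=
  let v := PySem.List.sorted ((PySem.List.pyRange 0 5 1).map (fun i => PySem.List.pyGetD arr i 0)) (fun x => x) false
  [PySem.List.pyGetD v 0 0 + PySem.List.pyGetD v 1 0 + PySem.List.pyGetD v 2 0 + PySem.List.pyGetD v 3 0,
   PySem.List.pyGetD v 1 0 + PySem.List.pyGetD v 2 0 + PySem.List.pyGetD v 3 0 + PySem.List.pyGetD v 4 0]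

-- ===== PRECONDITION & SPEC =====
-- Python A raises IndexError on lists with fewer than 5 elements (arr[0]/arr[i]); exactly those are excluded.
def Pre_miniMaxSum (arr : List Int) : Prop := 5 ≤ arr.length
instance (arr : List Int) : Decidable (Pre_miniMaxSum arr) := by unfold Pre_miniMaxSum; infer_instance
def pvWitness_miniMaxSum : List Int := [1, 3, 5, 7, 9]
def Spec_miniMaxSum (arr : List Int) (out : List Int) : Prop := out = miniMaxSum_alt arr
instance (arr : List Int) (out : List Int) : Decidable (Spec_miniMaxSum arr out) := by unfold Spec_miniMaxSum; infer_instance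

-- ===== CLAIM (what is proved, stated in full; the proofs are below) =====
def Claim_equal_miniMaxSum : Prop := ∀ (arr : List Int), Dom_miniMaxSum arr → Pre_miniMaxSum arr → Spec_miniMaxSum arr (miniMaxSum arr)

-- ===== LEMMAS AND PROOFS =====

-- The whole equivalence on a list with at least five elements a,b,c,d,e: A's loop computes
-- sum − running-max and sum − running-min; B's sorted first five [v0..v4] satisfies
-- v0 = min, v4 = max, v0+…+v4 = a+…+e, so the two pairs of sums coincide.
theorem miniMaxSum_eq_alt_cons (a b c d e : Int) (t : List Int) :
    miniMaxSum (a::b::c::d::e::t) = miniMaxSum_alt (a::b::c::d::e::t) := by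
  have hr : PySem.List.pyRange 0 5 1 = [0,1,2,3,4] := by decide
  unfold miniMaxSum miniMaxSum_alt
  rw [hr]
  simp only [List.map, List.foldl, PySem.List.pyGetD_ofNat', List.getD, List.getElem?_cons_zero,
    List.getElem?_cons_succ, Option.getD_some, List.nil_append]
  have hs := PySem.List.sorted_perm [a,b,c,d,e] (fun x : Int => x) false
  have hp := PySem.List.sorted_pairwise [a,b,c,d,e] (fun x : Int => x)
  set v := PySem.List.sorted [a,b,c,d,e] (fun x : Int => x) false with hv
  obtain ⟨v0, v1, v2, v3, v4, hveq⟩ : ∃ v0 v1 v2 v3 v4, v = [v0,v1,v2,v3,v4] := by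
    have hl : v.length = 5 := hs.length_eq
    match v, hl with
    | [v0,v1,v2,v3,v4], _ => exact ⟨v0,v1,v2,v3,v4, rfl⟩
  rw [hveq] at hs hp ⊢
  simp only [List.getElem?_cons_zero, List.getElem?_cons_succ, Option.getD_some]
  have hsum : v0+v1+v2+v3+v4 = a+b+c+d+e := by
    have := hs.sum_eq; simp at this; omega
  have hmem : ∀ x ∈ ([a,b,c,d,e] : List Int), x = v0 ∨ x = v1 ∨ x = v2 ∨ x = v3 ∨ x = v4 := by
    intro x hx
    have : x ∈ ([v0,v1,v2,v3,v4] : List Int) := hs.mem_iff.mpr hx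
    simpa using this
  have ha := hmem a (by simp); have hb := hmem b (by simp); have hc := hmem c (by simp)
  have hd := hmem d (by simp); have he := hmem e (by simp)
  simp only [List.pairwise_cons, List.mem_cons] at hp
  have hif_max : ∀ x y : Int, (if x > y then x else y) = y ⊔ x := by
    intro x y; rw [max_def]; split_ifs <;> omega
  have hif_min : ∀ x y : Int, (if x < y then x else y) = y ⊓ x := by
    intro x y; rw [min_def]; split_ifs <;> omega
  simp only [hif_max, hif_min, sup_idem]
  have p01 : v0 ≤ v1 := hp.1 v1 (Or.inl rfl)
  have p02 : v0 ≤ v2 := hp.1 v2 (Or.inr (Or.inl rfl))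
  have p03 : v0 ≤ v3 := hp.1 v3 (Or.inr (Or.inr (Or.inl rfl)))
  have p04 : v0 ≤ v4 := hp.1 v4 (Or.inr (Or.inr (Or.inr (Or.inl rfl))))
  have p14 : v1 ≤ v4 := hp.2.1 v4 (Or.inr (Or.inr (Or.inl rfl)))
  have p24 : v2 ≤ v4 := hp.2.2.1 v4 (Or.inr (Or.inl rfl))
  have p34 : v3 ≤ v4 := hp.2.2.2.1 v4 (Or.inl rfl)
  have hv0mem : v0 = a ∨ v0 = b ∨ v0 = c ∨ v0 = d ∨ v0 = e := by
    have := hs.subset (show v0 ∈ [v0,v1,v2,v3,v4] by simp); simpa using this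
  have hv4mem : v4 = a ∨ v4 = b ∨ v4 = c ∨ v4 = d ∨ v4 = e := by
    have := hs.subset (show v4 ∈ [v0,v1,v2,v3,v4] by simp); simpa using this
  have haa : a ≤ v4 := by rcases ha with h|h|h|h|h <;> omega
  have hbb : b ≤ v4 := by rcases hb with h|h|h|h|h <;> omega
  have hcc : c ≤ v4 := by rcases hc with h|h|h|h|h <;> omega
  have hdd : d ≤ v4 := by rcases hd with h|h|h|h|h <;> omega
  have hee : e ≤ v4 := by rcases he with h|h|h|h|h <;> omega
  have ha0 : v0 ≤ a := by rcases ha with h|h|h|h|h <;> omega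
  have hb0 : v0 ≤ b := by rcases hb with h|h|h|h|h <;> omega
  have hc0 : v0 ≤ c := by rcases hc with h|h|h|h|h <;> omega
  have hd0 : v0 ≤ d := by rcases hd with h|h|h|h|h <;> omega
  have he0 : v0 ≤ e := by rcases he with h|h|h|h|h <;> omega
  have hmax' : a ⊔ b ⊔ c ⊔ d ⊔ e = v4 := by
    refine le_antisymm (by simp [haa, hbb, hcc, hdd, hee]) ?_
    rcases hv4mem with rfl|rfl|rfl|rfl|rfl <;> simp
  have hmin' : a ⊓ b ⊓ c ⊓ d ⊓ e = v0 := by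
    refine le_antisymm ?_ (by simp [ha0, hb0, hc0, hd0, he0])
    rcases hv0mem with rfl|rfl|rfl|rfl|rfl <;> simp
  rw [hmax', hmin']
  simp only [List.singleton_append, List.cons.injEq, and_true]
  omega

-- ===== VERDICT (by name: the statement is the Claim_ definition above) =====
theorem miniMaxSum_spec : Claim_equal_miniMaxSum := by
  intro arr _ hpre
  unfold Pre_miniMaxSum at hpre
  obtain ⟨a, b, c, d, e, t, rfl⟩ :
      ∃ a b c d e t, arr = a :: b :: c :: d :: e :: t := by
    match arr, hpre with
    | a :: b :: c :: d :: e :: t, _ => exact ⟨a, b, c, d, e, t, rfl⟩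
  exact miniMaxSum_eq_alt_cons a b c d e t
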